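-- pv_equiv track=rewrite | github.com/yutanagano/tidytcells | src/tidytcells/_utils/alignment.py | collapse_aa_dict_per_gene
-- ===== SOURCE A (Python) =====
-- def _get_genes_to_alleles(alleles):
--     genes_to_alleles = dict()
--
--     for allele in alleles:
--         gene = allele.rsplit("*")[0]
--
--         if gene not in genes_to_alleles:
--             genes_to_alleles[gene] = [allele]
--         else:
--             genes_to_alleles[gene].append(allele)
--
--     return genes_to_alleles
--
-- def collapse_aa_dict_per_gene(symbol_to_aa_dict):
--     genes_to_alleles = _get_genes_to_alleles(symbol_to_aa_dict.keys())
--     genes_to_aa = dict()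
--
--     for gene in genes_to_alleles:
--         all_genes_same_aa = True
--         gene_aa_dict = None
--
--         for allele in genes_to_alleles[gene]:
--             if gene_aa_dict is None:
--                 gene_aa_dict = symbol_to_aa_dict[allele]
--             else:
--                 if gene_aa_dict != symbol_to_aa_dict[allele]:
--                     all_genes_same_aa = False
--
--         if all_genes_same_aa:
--             genes_to_aa[gene] = gene_aa_dict
--         else:
--             for allele in genes_to_alleles[gene]:
--                 genes_to_aa[allele] = symbol_to_aa_dict[allele]
--
--     return genes_to_aa
-- ===== SOURCE B (Python) =====
-- def collapse_aa_dict_per_gene(symbol_to_aa_dict):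
--     # Worklist partition: repeatedly split off the first-seen gene's whole group,
--     # emit it collapsed (if all its aa dicts equal the first) or exploded, recurse
--     # on the remainder; no grouping dict, one dict() built at the end.
--     items = list(symbol_to_aa_dict.items())
--     out = []
--     while items:
--         (allele, rep), rest = items[0], items[1:]
--         gene = allele.rsplit("*")[0]
--         group = [(a, d) for a, d in items if a.rsplit("*")[0] == gene]
--         items = [(a, d) for a, d in rest if a.rsplit("*")[0] != gene]
--         if all(rep == d for _, d in group):
--             out.append((gene, rep))
--         else:
--             out.extend(group)
--     return dict(out)
-- ===== Notes on version B (the rewrite author's own statement) =====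
-- stated objective: alternative
-- what changed: B drops A's gene->alleles grouping dict and running-representative flag entirely: a worklist loop repeatedly partitions the remaining items into the first item's gene group and the rest, checks the group with one all(rep == d) test, appends the collapsed or exploded group to a flat list, and builds a single dict at the end.
import Mathlib
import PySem

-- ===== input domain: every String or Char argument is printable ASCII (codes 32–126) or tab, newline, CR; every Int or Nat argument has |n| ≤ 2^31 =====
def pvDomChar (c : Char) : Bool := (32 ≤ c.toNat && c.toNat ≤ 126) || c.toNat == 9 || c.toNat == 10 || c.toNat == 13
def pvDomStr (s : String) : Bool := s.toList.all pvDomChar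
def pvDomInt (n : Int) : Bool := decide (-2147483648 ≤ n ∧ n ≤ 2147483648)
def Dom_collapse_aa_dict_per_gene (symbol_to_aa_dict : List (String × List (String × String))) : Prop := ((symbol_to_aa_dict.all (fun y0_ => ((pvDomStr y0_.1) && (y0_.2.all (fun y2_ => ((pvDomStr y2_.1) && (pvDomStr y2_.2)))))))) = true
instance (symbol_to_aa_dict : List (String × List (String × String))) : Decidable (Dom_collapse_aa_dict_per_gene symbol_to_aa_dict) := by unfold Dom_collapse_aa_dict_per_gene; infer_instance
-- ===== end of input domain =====

-- B replaces A's grouping dict + running-representative flag by a worklist partition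
-- recursion emitting into one flat list; objective: alternative structure, same results.


-- ===== PORT A =====
-- allele.rsplit("*")[0]: rsplit with no maxsplit yields the same pieces as split, so [0]
-- is the part before the first "*" (the separator is the nonempty literal "*", so split?
-- is always some, and split never returns []: both defaults are unreachable).
def pvGene (s : String) : String := ((PySem.Str.split? s "*").getD [""]).headD ""

-- Python's `==` on two dicts ignores insertion order: equal size and every (k, v) of the
-- left found by lookup in the right (exact for dicts, whose keys are distinct).
def pvDictEq (a b : List (String × String)) : Bool :=
  (a.length == b.length) && a.all (fun kv => (PySem.Dict.mk b).get? kv.1 == some kv.2)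

-- symbol_to_aa_dict[allele]; only applied to alleles that are keys, so the default is unreachable.
def pvLook (m : List (String × List (String × String))) (k : String) : List (String × String) :=
  (PySem.Dict.mk m).getD k []

def get_genes_to_alleles (alleles : List String) : PySem.Dict String (List String) :=
  alleles.foldl
    (fun d allele =>
      match d.get? (pvGene allele) with
      | none => d.insert (pvGene allele) [allele]
      | some xs => d.insert (pvGene allele) (xs ++ [allele]))
    PySem.Dict.empty

def collapse_aa_dict_per_gene (symbol_to_aa_dict : List (String × List (String × String))) : List (String × List (String × String)) :=
  let gta := get_genes_to_alleles (symbol_to_aa_dict.map Prod.fst)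
  (gta.items.foldl
    (fun (acc : PySem.Dict String (List (String × String))) gp =>
      let alleles := gta.getD gp.1 []
      let st := alleles.foldl
        (fun (st : Bool × Option (List (String × String))) allele =>
          match st.2 with
          | none => (st.1, some (pvLook symbol_to_aa_dict allele))
          | some g =>
            (if pvDictEq g (pvLook symbol_to_aa_dict allele) then st.1 else false, some g))
        (true, none)
      if st.1 then acc.insert gp.1 (st.2.getD [])
      else alleles.foldl (fun acc allele => acc.insert allele (pvLook symbol_to_aa_dict allele)) acc)
    PySem.Dict.empty).items

-- ===== PORT B =====
-- the while loop of Source B: each round splits off the whole group of the first item's gene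
def collapse_groups (items : List (String × List (String × String))) : List (String × List (String × String)) :=
  match items with
  | [] => []
  | p :: rest =>
    let gene := pvGene p.1
    let rep := p.2
    let group := (p :: rest).filter (fun q => pvGene q.1 == gene)
    let remaining := rest.filter (fun q => !(pvGene q.1 == gene))
    (if group.all (fun q => pvDictEq rep q.2) then [(gene, rep)] else group) ++
      collapse_groups remaining
termination_by items.length
decreasing_by
  simp only [List.length_cons, List.length_unattach]
  exact Nat.lt_succ_of_le (le_trans (List.length_filter_le _ _) (by simp))

def collapse_aa_dict_per_gene_alt (symbol_to_aa_dict : List (String × List (String × String))) : List (String × List (String × String)) :=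
  ((collapse_groups symbol_to_aa_dict).foldl
    (fun (acc : PySem.Dict String (List (String × String))) q => acc.insert q.1 q.2)
    PySem.Dict.empty).items

-- ===== PRECONDITION & SPEC =====
-- Pre_ only demands distinct keys, outer and inner: the Python argument is a dict of
-- dicts, whose key lists are necessarily duplicate-free; association lists with
-- duplicate keys represent no Python input.
def Pre_collapse_aa_dict_per_gene (symbol_to_aa_dict : List (String × List (String × String))) : Prop :=
  (symbol_to_aa_dict.map Prod.fst).Nodup ∧ ∀ p ∈ symbol_to_aa_dict, (p.2.map Prod.fst).Nodup
instance (symbol_to_aa_dict : List (String × List (String × String))) : Decidable (Pre_collapse_aa_dict_per_gene symbol_to_aa_dict) := by unfold Pre_collapse_aa_dict_per_gene; infer_instance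

def pvWitness_collapse_aa_dict_per_gene : (List (String × List (String × String))) :=
  [("TRAV1*01", [("1", "M")]), ("TRAV1*02", [("1", "M")]), ("TRBV2*01", [("1", "K")]), ("TRBV2*02", [("1", "L")])]

def Spec_collapse_aa_dict_per_gene (symbol_to_aa_dict : List (String × List (String × String))) (out : List (String × List (String × String))) : Prop := out = collapse_aa_dict_per_gene_alt symbol_to_aa_dict
instance (symbol_to_aa_dict : List (String × List (String × String))) (out : List (String × List (String × String))) : Decidable (Spec_collapse_aa_dict_per_gene symbol_to_aa_dict out) := by unfold Spec_collapse_aa_dict_per_gene; infer_instance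

-- ===== CLAIM (what is proved, stated in full; the proofs are below) =====
def Claim_equal_collapse_aa_dict_per_gene : Prop := ∀ (symbol_to_aa_dict : List (String × List (String × String))), Dom_collapse_aa_dict_per_gene symbol_to_aa_dict → Pre_collapse_aa_dict_per_gene symbol_to_aa_dict → Spec_collapse_aa_dict_per_gene symbol_to_aa_dict (collapse_aa_dict_per_gene symbol_to_aa_dict)

-- ===== LEMMAS AND PROOFS =====

-- what A emits for one gene group (g, alleles) into the output dict
def emitA (m : List (String × List (String × String))) (gp : String × List String) :
    List (String × List (String × String)) :=
  match gp.2 with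
  | [] => [(gp.1, [])]
  | a1 :: tl =>
    if tl.all (fun a => pvDictEq (pvLook m a1) (pvLook m a))
    then [(gp.1, pvLook m a1)]
    else (a1 :: tl).map (fun a => (a, pvLook m a))

theorem pvDictEq_refl (a : List (String × String)) (h : (a.map Prod.fst).Nodup) :
    pvDictEq a a = true := by
  unfold pvDictEq
  simp only [beq_self_eq_true, Bool.true_and, List.all_eq_true]
  intro kv hkv
  have hg := PySem.Dict.get?_of_mem_items (d := PySem.Dict.mk a) (k := kv.1) (v := kv.2)
    (by simpa using hkv) (by simpa [PySem.Dict.keys] using h)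
  simp [hg]

-- A's grouping step is Dict.modify
theorem gta_eq_modify (alleles : List String) :
    get_genes_to_alleles alleles
      = (alleles.map (fun a => (pvGene a, a))).foldl
          (fun d p => d.modify p.1 [] (· ++ [p.2])) PySem.Dict.empty := by
  unfold get_genes_to_alleles
  rw [List.foldl_map]
  congr 1
  funext d a
  cases hx : d.get? (pvGene a) <;>
    simp [PySem.Dict.modify, PySem.Dict.getD_eq_get?_getD, hx]

theorem gta_items (alleles : List String) :
    (get_genes_to_alleles alleles).items
      = (PySem.Set.ofList (alleles.map pvGene)).map
          (fun g => (g, alleles.filter (fun a => pvGene a == g))) := by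
  rw [gta_eq_modify]
  set L := alleles.map (fun a => (pvGene a, a)) with hL
  have hk : (L.foldl (fun (d : PySem.Dict String (List String)) p => d.modify p.1 [] (· ++ [p.2])) PySem.Dict.empty).keys
      = PySem.Set.ofList (alleles.map pvGene) := by
    rw [show (fun (d : PySem.Dict String (List String)) (p : String × String) => d.modify p.1 [] (· ++ [p.2]))
        = (fun d p => d.modify (Prod.fst p) [] ((fun (d : PySem.Dict String (List String)) (p : String × String) (v : List String) => v ++ [p.2]) d p)) from rfl]
    rw [PySem.Dict.keys_foldl_modify_key]
    simp [hL, Function.comp_def, PySem.Set.update_nil_left, PySem.Dict.keys, PySem.Dict.empty]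
  have hnd : (L.foldl (fun (d : PySem.Dict String (List String)) p => d.modify p.1 [] (· ++ [p.2])) PySem.Dict.empty).keys.Nodup := by
    rw [hk]; exact PySem.Set.nodup_ofList _
  rw [PySem.Dict.items_eq_map_keys _ hnd []]
  rw [hk]
  apply List.map_congr_left
  intro g hg
  congr 1
  rw [PySem.Dict.getD_foldl_modify_append]
  simp only [PySem.Dict.getD_empty, List.nil_append, hL]
  rw [List.filter_map]
  simp [Function.comp_def]

-- characterisation of A's inner representative loop
theorem pv_inner_aux (m : List (String × List (String × String)))
    (as : List String) (b : Bool) (g : List (String × String)) :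
    as.foldl
      (fun (st : Bool × Option (List (String × String))) allele =>
        match st.2 with
        | none => (st.1, some (pvLook m allele))
        | some g => (if pvDictEq g (pvLook m allele) then st.1 else false, some g))
      (b, some g)
    = (b && as.all (fun a => pvDictEq g (pvLook m a)), some g) := by
  induction as generalizing b with
  | nil => simp
  | cons a rest ih =>
    simp only [List.foldl_cons, List.all_cons]
    rw [ih]
    by_cases h : pvDictEq g (pvLook m a) <;> simp [h]

-- fold-of-folds over the emissions is a fold over their concatenation
theorem foldl_emit_flatMap {E K V : Type} [BEq K] (l : List E) (f : E → List (K × V))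
    (acc : PySem.Dict K V) :
    l.foldl (fun acc e => (f e).foldl (fun acc (q : K × V) => acc.insert q.1 q.2) acc) acc
      = (l.flatMap f).foldl (fun acc q => acc.insert q.1 q.2) acc := by
  induction l generalizing acc with
  | nil => rfl
  | cons e rest ih => simp [List.foldl_append, ih]

-- pointwise-equal predicates give the same List.all
theorem all_congr' {α : Type} (l : List α) (f g : α → Bool) (h : ∀ x ∈ l, f x = g x) : l.all f = l.all g := by
  induction l with
  | nil => rfl
  | cons x xs ih =>
    simp only [List.all_cons, h x List.mem_cons_self,
      ih (fun y hy => h y (List.mem_cons_of_mem _ hy))]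

-- dedup commutes with filter (sets are lists of first occurrences)
theorem ofList_filter (l : List String) (p : String → Bool) :
    PySem.Set.ofList (l.filter p) = (PySem.Set.ofList l).filter p := by
  induction l with
  | nil => rfl
  | cons x xs ih =>
    rw [PySem.Set.ofList_cons,
        show PySem.Set.discard (PySem.Set.ofList xs) x
          = (PySem.Set.ofList xs).filter (fun y => !(y == x)) from rfl]
    by_cases hx : p x = true
    · rw [List.filter_cons_of_pos hx, PySem.Set.ofList_cons,
          show PySem.Set.discard (PySem.Set.ofList (xs.filter p)) x
            = (PySem.Set.ofList (xs.filter p)).filter (fun y => !(y == x)) from rfl,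
          ih, List.filter_cons_of_pos hx, List.filter_filter, List.filter_filter]
      congr 1
      apply List.filter_congr
      intro y _
      rw [Bool.and_comm]
    · rw [List.filter_cons_of_neg hx, ih, List.filter_cons_of_neg hx, List.filter_filter]
      apply List.filter_congr
      intro y _
      by_cases hy : y = x
      · subst hy; simp [hx]
      · simp [hy]

-- B's recursion computes the concatenation of A's per-gene emissions
theorem collapse_groups_eq (m : List (String × List (String × String)))
    (hnd : (m.map Prod.fst).Nodup) (hin : ∀ p ∈ m, (p.2.map Prod.fst).Nodup) :
    ∀ m', (∀ p ∈ m', p ∈ m) → (m'.map Prod.fst).Nodup →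
      collapse_groups m'
        = ((PySem.Set.ofList (m'.map (fun p => pvGene p.1))).map
            (fun g => (g, (m'.map Prod.fst).filter (fun a => pvGene a == g)))).flatMap
            (emitA m) := by
  have hL : ∀ q ∈ m, pvLook m q.1 = q.2 := by
    intro q hq
    exact PySem.Dict.getD_of_mem_items (PySem.Dict.mk m) (by simpa using hq)
      (by simpa [PySem.Dict.keys] using hnd) []
  intro m'
  induction m' using collapse_groups.induct with
  | case1 => intro _ _; simp [collapse_groups]
  | case2 p rest gene remaining ih =>
    intro hsub hnd'
    have hrem : remaining = rest.filter (fun q => !(pvGene q.1 == gene)) := by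
      show (rest.attach.filter ((fun q => !(pvGene q.1 == gene)) ∘ Subtype.val)).map Subtype.val = _
      rw [← List.filter_map, List.attach_map_subtype_val]
    rw [hrem] at ih
    rw [collapse_groups]
    simp only [List.map_cons] at hnd'
    have hsubr : ∀ q ∈ rest.filter (fun q => !(pvGene q.1 == gene)), q ∈ m :=
      fun q hq => hsub q (List.mem_cons_of_mem _ (List.mem_of_mem_filter hq))
    have hfm : rest.filter (fun q => !(pvGene q.1 == gene))
        = rest.filter ((fun a => !(pvGene a == gene)) ∘ Prod.fst) := rfl
    have hndr : ((rest.filter (fun q => !(pvGene q.1 == gene))).map Prod.fst).Nodup := by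
      rw [hfm, ← List.filter_map]
      exact hnd'.of_cons.filter _
    rw [ih hsubr hndr]
    have hofcons : PySem.Set.ofList ((p :: rest).map (fun q => pvGene q.1))
        = pvGene p.1 :: PySem.Set.ofList
            ((rest.filter (fun q => !(pvGene q.1 == pvGene p.1))).map (fun q => pvGene q.1)) := by
      rw [List.map_cons, PySem.Set.ofList_cons,
          show PySem.Set.discard (PySem.Set.ofList (rest.map (fun q => pvGene q.1))) (pvGene p.1)
            = (PySem.Set.ofList (rest.map (fun q => pvGene q.1))).filter (fun y => !(y == pvGene p.1)) from rfl,
          ← ofList_filter, List.filter_map]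
      rfl
    rw [hofcons, List.map_cons, List.flatMap_cons]
    have hgq : ∀ q ∈ rest.filter (fun q => pvGene q.1 == pvGene p.1), pvLook m q.1 = q.2 :=
      fun q hq => hL q (hsub q (List.mem_cons_of_mem _ (List.mem_of_mem_filter hq)))
    have hp2 : pvLook m p.1 = p.2 := hL p (hsub p List.mem_cons_self)
    have hgrp : rest.filter (fun q => pvGene q.1 == pvGene p.1)
        = rest.filter ((fun a => pvGene a == pvGene p.1) ∘ Prod.fst) := rfl
    have htl : ((p :: rest).map Prod.fst).filter (fun a => pvGene a == pvGene p.1)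
        = p.1 :: (rest.filter (fun q => pvGene q.1 == pvGene p.1)).map Prod.fst := by
      rw [List.map_cons, List.filter_cons_of_pos (by simp), hgrp, ← List.filter_map]
    congr 1
    · -- the first gene group: A's emission = B's collapsed-or-exploded group
      rw [List.filter_cons_of_pos (by simp)]
      rw [show emitA m (pvGene p.1, ((p :: rest).map Prod.fst).filter (fun a => pvGene a == pvGene p.1))
          = emitA m (pvGene p.1, p.1 :: (rest.filter (fun q => pvGene q.1 == pvGene p.1)).map Prod.fst) from by rw [htl]]
      simp only [emitA, List.all_cons, pvDictEq_refl p.2 (hin p (hsub p List.mem_cons_self)),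
        Bool.true_and, List.all_map]
      have hcond : (rest.filter (fun q => pvGene q.1 == pvGene p.1)).all
            ((fun a => pvDictEq (pvLook m p.1) (pvLook m a)) ∘ Prod.fst)
          = (rest.filter (fun q => pvGene q.1 == pvGene p.1)).all (fun q => pvDictEq p.2 q.2) := by
        apply all_congr'
        intro q hq
        simp [Function.comp, hp2, hgq q hq]
      rw [hcond]
      by_cases hc : (rest.filter (fun q => pvGene q.1 == pvGene p.1)).all (fun q => pvDictEq p.2 q.2) = true
      · rw [if_pos hc, if_pos hc, hp2]
      · rw [if_neg hc, if_neg hc, List.map_cons, List.map_map]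
        congr 1
        · rw [hp2]
        · rw [show ((fun a => (a, pvLook m a)) ∘ Prod.fst)
              = (fun (q : String × List (String × String)) => (q.1, pvLook m q.1)) from rfl]
          have hid : ∀ q ∈ rest.filter (fun q => pvGene q.1 == pvGene p.1),
              (q.1, pvLook m q.1) = id q := by
            intro q hq
            rw [hgq q hq]
            rfl
          rw [List.map_congr_left hid, List.map_id]
        -- (no more goals here)
    · -- the remaining genes: the allele pools agree once gene-p entries are gone
      congr 1
      apply List.map_congr_left
      intro g' hg'
      have hne : (pvGene p.1 == g') = false := by
        have h1 : g' ∈ (rest.filter (fun q => !(pvGene q.1 == pvGene p.1))).map (fun q => pvGene q.1) := by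
          rw [← PySem.Set.mem_ofList]
          exact hg'
        obtain ⟨q, hq, rfl⟩ := List.mem_map.mp h1
        have h2 := (List.mem_filter.mp hq).2
        simp only [Bool.not_eq_eq_eq_not, Bool.not_true, beq_eq_false_iff_ne, ne_eq] at h2 ⊢
        exact fun h => h2 h.symm
      congr 1
      rw [List.map_cons, List.filter_cons_of_neg (by simp [hne]),
          show rest.filter (fun q => !(pvGene q.1 == pvGene p.1))
            = rest.filter ((fun a => !(pvGene a == pvGene p.1)) ∘ Prod.fst) from rfl,
          ← List.filter_map, List.filter_filter]
      apply List.filter_congr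
      intro a _
      by_cases h : (pvGene a == g') = true
      · have ha := (beq_iff_eq).mp h
        have hag : ¬ (pvGene a = pvGene p.1) := by
          intro he
          rw [he] at ha
          simp [ha] at hne
        simp [h, hag]
      · simp [h]

-- ===== VERDICT (by name: the statement is the Claim_ definition above) =====
theorem collapse_aa_dict_per_gene_spec : Claim_equal_collapse_aa_dict_per_gene := by
  intro m _ hpre
  obtain ⟨hnd, hin⟩ := hpre
  unfold Spec_collapse_aa_dict_per_gene collapse_aa_dict_per_gene collapse_aa_dict_per_gene_alt
  dsimp only
  have hkeys : (get_genes_to_alleles (m.map Prod.fst)).keys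
      = PySem.Set.ofList ((m.map Prod.fst).map pvGene) := by
    show ((get_genes_to_alleles (m.map Prod.fst)).items.map Prod.fst) = _
    rw [gta_items]
    simp [List.map_map, Function.comp_def]
  have hkn : (get_genes_to_alleles (m.map Prod.fst)).keys.Nodup := by
    rw [hkeys]; exact PySem.Set.nodup_ofList _
  congr 1
  rw [collapse_groups_eq m hnd hin m (fun _ h => h) hnd]
  rw [show m.map (fun p => pvGene p.1) = (m.map Prod.fst).map pvGene from by
        rw [List.map_map]; rfl]
  rw [← gta_items, ← foldl_emit_flatMap]
  apply PySem.List.foldl_congr_mem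
  intro acc gp hgp
  have hall : (get_genes_to_alleles (m.map Prod.fst)).getD gp.1 [] = gp.2 :=
    PySem.Dict.getD_of_mem_items _ hgp hkn []
  simp only [hall]
  cases h2 : gp.2 with
  | nil => simp [emitA, h2]
  | cons a1 tl =>
    simp only [List.foldl_cons, pv_inner_aux, emitA, h2, Bool.true_and]
    by_cases hc : tl.all (fun a => pvDictEq (pvLook m a1) (pvLook m a)) = true
    · simp only [hc, if_true]
      rfl
    · have hcf : tl.all (fun a => pvDictEq (pvLook m a1) (pvLook m a)) = false :=
        Bool.eq_false_iff.mpr hc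
      simp only [hcf, Bool.false_eq_true, if_false, List.foldl_map, List.foldl_cons]
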